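-- pv_equiv track=rewrite | github.com/WendaDeng/ckmn | temporal_transforms.py | center_get_frame_names
-- ===== SOURCE A (Python) =====
-- def center_get_frame_names(temp_frame_names, duration):
--     center_index = len(temp_frame_names) // 2
--     begin_index = max(0, center_index - (duration // 2))
--     end_index = min(begin_index + duration, len(temp_frame_names))
--
--     out = temp_frame_names[begin_index:end_index]
--
--     for index in out:
--         if len(out) >= duration:
--             break
--         out.append(index)
--
--     return out
-- ===== SOURCE B (Python) =====
-- def center_get_frame_names(temp_frame_names, duration):
--     begin_index = max(0, len(temp_frame_names) // 2 - duration // 2)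
--     end_index = min(begin_index + duration, len(temp_frame_names))
--     base = temp_frame_names[begin_index:end_index]
--     if not base:
--         return []
--     return [base[i % len(base)] for i in range(max(duration, len(base)))]
-- ===== Notes on version B (the rewrite author's own statement) =====
-- stated objective: simpler
-- what changed: A extends the centered slice by iterating over the list while appending to it (Python's mutate-while-iterating trick); B builds the result directly as a modular-index comprehension base[i % len(base)] over range(max(duration, len(base))).
import Mathlib
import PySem

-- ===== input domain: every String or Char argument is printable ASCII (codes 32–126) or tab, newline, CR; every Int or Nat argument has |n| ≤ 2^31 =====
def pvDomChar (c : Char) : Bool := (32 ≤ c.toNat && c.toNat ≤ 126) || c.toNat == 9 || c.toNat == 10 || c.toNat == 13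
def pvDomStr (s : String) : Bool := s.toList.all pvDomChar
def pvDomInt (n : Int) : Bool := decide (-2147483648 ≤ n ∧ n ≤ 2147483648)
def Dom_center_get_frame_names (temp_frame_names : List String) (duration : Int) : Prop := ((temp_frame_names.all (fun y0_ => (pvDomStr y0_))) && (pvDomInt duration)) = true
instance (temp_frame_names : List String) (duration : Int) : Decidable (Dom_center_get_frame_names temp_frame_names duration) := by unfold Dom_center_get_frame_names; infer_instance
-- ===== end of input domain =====

-- B replaces A's self-appending loop by a direct modular-index comprehension (alternative decomposition, same cost).

-- ===== PORT A =====
-- A's 'for index in out: ... out.append(index)' iterates a list while appending to it: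
-- the cursor i advances while the list grows, so it cycles until len(out) >= duration
-- (or the cursor passes the end, which only happens when the slice is empty).
def centerLoopA (out : List String) (i : Nat) (duration : Int) : List String :=
  if h : i < out.length then
    if duration ≤ (out.length : Int) then out
    else centerLoopA (out ++ [out[i]]) (i + 1) duration
  else out
termination_by (duration - out.length).toNat
decreasing_by simp only [List.length_append, List.length_cons, List.length_nil]; omega

def center_get_frame_names (temp_frame_names : List String) (duration : Int) : List String :=
  let center_index : Int := PySem.Int.floordiv temp_frame_names.length 2
  let begin_index : Int := max 0 (center_index - PySem.Int.floordiv duration 2)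
  let end_index : Int := min (begin_index + duration) temp_frame_names.length
  let out := PySem.List.slice temp_frame_names (some begin_index) (some end_index)
  centerLoopA out 0 duration

-- ===== PORT B =====
def center_get_frame_names_alt (temp_frame_names : List String) (duration : Int) : List String :=
  let begin_index : Int := max 0 (PySem.Int.floordiv temp_frame_names.length 2 - PySem.Int.floordiv duration 2)
  let end_index : Int := min (begin_index + duration) temp_frame_names.length
  let base := PySem.List.slice temp_frame_names (some begin_index) (some end_index)
  if base = [] then []
  else (PySem.List.pyRange 0 (max duration (base.length : Int)) 1).map
    (fun i => PySem.List.pyGetD base (PySem.Int.mod i (base.length : Int)) "")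

-- ===== PRECONDITION & SPEC =====
def Spec_center_get_frame_names (temp_frame_names : List String) (duration : Int) (out : List String) : Prop := out = center_get_frame_names_alt temp_frame_names duration
instance (temp_frame_names : List String) (duration : Int) (out : List String) : Decidable (Spec_center_get_frame_names temp_frame_names duration out) := by unfold Spec_center_get_frame_names; infer_instance

-- ===== CLAIM (what is proved, stated in full; the proofs are below) =====
def Claim_equal_center_get_frame_names : Prop := ∀ (temp_frame_names : List String) (duration : Int), Dom_center_get_frame_names temp_frame_names duration → Spec_center_get_frame_names temp_frame_names duration (center_get_frame_names temp_frame_names duration)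

-- ===== LEMMAS AND PROOFS =====

-- cyclic tiling of base to length m
def cycTile (base : List String) (m : Nat) : List String :=
  (List.range m).map (fun i => base.getD (i % base.length) "")

theorem cycTile_self (base : List String) : cycTile base base.length = base := by
  apply List.ext_getElem
  · simp [cycTile]
  · intro i h1 h2
    simp only [cycTile, List.getElem_map, List.getElem_range]
    rw [Nat.mod_eq_of_lt h2]
    simp [List.getD_eq_getElem?_getD, List.getElem?_eq_getElem h2]

theorem cycTile_succ (base : List String) (m : Nat) :
    cycTile base (m + 1) = cycTile base m ++ [base.getD (m % base.length) ""] := by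
  simp [cycTile, List.range_succ]

theorem centerLoopA_cycTile (base : List String) (hb : 0 < base.length) (dur : Int)
    (k m i : Nat) (hm : base.length ≤ m) (hi : i + base.length = m)
    (hk : (dur - m).toNat ≤ k) :
    centerLoopA (cycTile base m) i dur = cycTile base (max m dur.toNat) := by
  induction k generalizing m i with
  | zero =>
    have hdm : dur ≤ (m : Int) := by omega
    rw [centerLoopA]
    have hlen : (cycTile base m).length = m := by simp [cycTile]
    have hmax : max m dur.toNat = m := by omega
    rw [hmax]
    split
    · simp only [hlen]
      rw [if_pos (by omega)]
    · rfl
  | succ k ih =>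
    rw [centerLoopA]
    have hlen : (cycTile base m).length = m := by simp [cycTile]
    by_cases hdm : dur ≤ (m : Int)
    · have hmax : max m dur.toNat = m := by omega
      rw [hmax]
      split
      · simp only [hlen]
        rw [if_pos (by omega)]
      · rfl
    · have him : i < (cycTile base m).length := by omega
      rw [dif_pos him]
      rw [if_neg (by omega)]
      have hget : (cycTile base m)[i] = base.getD (m % base.length) "" := by
        have hi' : i < m := by omega
        simp [cycTile]
        congr 1
        rw [← hi, Nat.add_mod_right]
      rw [hget, ← cycTile_succ]
      have := ih (m + 1) (i + 1) (by omega) (by omega) (by omega)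
      rw [this]
      congr 1
      omega

theorem alt_eq_cycTile (base : List String) (dur : Int) :
    (PySem.List.pyRange 0 (max dur (base.length : Int)) 1).map
      (fun i => PySem.List.pyGetD base (PySem.Int.mod i (base.length : Int)) "")
    = cycTile base (max dur (base.length : Int)).toNat := by
  unfold cycTile
  rw [PySem.List.pyRange_one, List.map_map]
  simp
  intro a _
  rw [show ((a : Int) % (base.length : Int)) = ((a % base.length : Nat) : Int) from (Int.natCast_mod a base.length).symm, PySem.List.pyGetD_natCast]
  simp [List.getD]

-- ===== VERDICT (by name: the statement is the Claim_ definition above) =====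
theorem center_get_frame_names_spec : Claim_equal_center_get_frame_names := by
  intro tfn dur _
  unfold Spec_center_get_frame_names center_get_frame_names center_get_frame_names_alt
  dsimp only
  by_cases hb : PySem.List.slice tfn (some (max 0 (PySem.Int.floordiv (tfn.length : Int) 2 - PySem.Int.floordiv dur 2))) (some (min (max 0 (PySem.Int.floordiv (tfn.length : Int) 2 - PySem.Int.floordiv dur 2) + dur) (tfn.length : Int))) = []
  · rw [hb, if_pos rfl, centerLoopA]
    simp
  · set base := PySem.List.slice tfn (some (max 0 (PySem.Int.floordiv (tfn.length : Int) 2 - PySem.Int.floordiv dur 2))) (some (min (max 0 (PySem.Int.floordiv (tfn.length : Int) 2 - PySem.Int.floordiv dur 2) + dur) (tfn.length : Int))) with hdef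
    rw [if_neg hb, alt_eq_cycTile base dur]
    have hL : 0 < base.length := List.length_pos_of_ne_nil hb
    calc centerLoopA base 0 dur
        = centerLoopA (cycTile base base.length) 0 dur := by rw [cycTile_self]
      _ = cycTile base (max base.length dur.toNat) :=
          centerLoopA_cycTile base hL dur ((dur - (base.length : Int)).toNat) base.length 0 le_rfl (by omega) le_rfl
      _ = cycTile base (max dur (base.length : Int)).toNat := by congr 1; omega
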